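-- pv_equiv track=rewrite | github.com/saman1000/exercises | string-practice.py | repeat_substring
-- ===== SOURCE A (Python) =====
-- def repeat_substring(s):
--     # TODO: implement the function according to the task requirements.
--     substring = ""
--     if s:
--         str_length = len(s)
--         sub_length = int(str_length / 2)
--         while sub_length > 0:
--             if s[:sub_length] * int(str_length / sub_length) == s:
--                 return s[:sub_length]
--             sub_length -= 1
--     return substring
-- ===== SOURCE B (Python) =====
-- def repeat_substring(s):
--     # Doubled-string trick: the first shift 0 < p <= n at which s occurs in s+s
--     # is the smallest rotation fixing s; it divides n (the fixing shifts form a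
--     # subgroup of Z_n), and s tiles by a prefix iff p < n.  The longest tiling
--     # prefix then has length n // (smallest factor >= 2 of n // p) -- pure
--     # arithmetic, no candidate tilings are ever built or compared.
--     n = len(s)
--     if n == 0:
--         return ""
--     p = (s + s).find(s, 1)
--     if p == n:
--         return ""
--     r = n // p
--     d = 2
--     while r % d:
--         d += 1
--     return s[:n // d]
-- ===== Notes on version B (the rewrite author's own statement) =====
-- stated objective: faster
-- what changed: A scans every candidate length n/2..1 descending, building the tiled string and comparing it to s for each; B never builds a tiling: it finds the smallest shift p at which s occurs in s+s with a single substring search (the shifts fixing s under rotation form a subgroup of Z_n, so p divides n and p < n iff s tiles), then computes the answer length arithmetically as n // (smallest factor >= 2 of n//p).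
import Mathlib
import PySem

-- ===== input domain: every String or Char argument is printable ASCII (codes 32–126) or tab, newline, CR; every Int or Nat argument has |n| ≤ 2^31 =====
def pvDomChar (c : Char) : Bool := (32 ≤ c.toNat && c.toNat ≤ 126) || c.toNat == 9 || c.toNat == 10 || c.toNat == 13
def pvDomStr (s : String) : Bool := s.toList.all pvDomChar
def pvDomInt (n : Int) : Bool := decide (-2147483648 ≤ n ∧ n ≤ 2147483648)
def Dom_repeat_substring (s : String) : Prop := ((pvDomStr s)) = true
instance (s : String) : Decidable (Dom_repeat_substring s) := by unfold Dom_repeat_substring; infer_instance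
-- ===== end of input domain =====

-- B replaces A's descending scan that builds and compares a tiling for every candidate
-- length by the doubled-string trick: the first shift at which s occurs in s+s is the
-- smallest rotation fixing s, and the answer follows by arithmetic on divisors
-- (objective: faster, measured; the equivalence below is exact on all strings).

-- ===== PORT A =====
-- A's while-condition at candidate length m: s[:m] * int(len(s)/m) == s.
-- s[:m] is List.take m (exact for 0 ≤ m: PySem.List.slice_to_natCast);
-- '*' on str is PySem.List.pyRepeat; int(n/m) = n // m (both operands nonnegative).
def pvCondA (cs : List Char) (n m : Nat) : Bool :=
  PySem.List.pyRepeat (cs.take m) ((n / m : Nat) : Int) == cs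

-- the while-loop: sub_length counts down from n/2 to 1; the fuel IS sub_length
def pvLoopA (cs : List Char) (n : Nat) : Nat → List Char
  | 0 => []
  | L + 1 => if pvCondA cs n (L + 1) then cs.take (L + 1) else pvLoopA cs n L

def repeat_substring (s : String) : String :=
  if s.toList = [] then ""
  else String.ofList (pvLoopA s.toList s.toList.length (s.toList.length / 2))

-- ===== PORT B =====
-- B's `while r % d: d += 1`: smallest factor of r; fuel r.toNat (proved sufficient below)
def pvLoopD (r : Int) : Int → Nat → Int
  | d, 0 => d
  | d, fuel + 1 => if PySem.Int.mod r d = 0 then d else pvLoopD r (d + 1) fuel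

-- (s+s).find(s, 1) is PySem.Chars.findFrom; s[:n//d] is PySem.List.slice with n//d = floordiv
def repeat_substring_alt (s : String) : String :=
  let cs := s.toList
  let n : Int := (cs.length : Int)
  if cs.length = 0 then ""
  else
    let p : Int := PySem.Chars.findFrom (cs ++ cs) cs 1
    if p = n then ""
    else
      let r : Int := PySem.Int.floordiv n p
      let d : Int := pvLoopD r 2 r.toNat
      String.ofList (PySem.List.slice cs none (some (PySem.Int.floordiv n d)))

-- ===== PRECONDITION & SPEC =====
def Spec_repeat_substring (s : String) (out : String) : Prop := out = repeat_substring_alt s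
instance (s : String) (out : String) : Decidable (Spec_repeat_substring s out) := by unfold Spec_repeat_substring; infer_instance

-- ===== CLAIM (what is proved, stated in full; the proofs are below) =====
def Claim_equal_repeat_substring : Prop := ∀ (s : String), Dom_repeat_substring s → Spec_repeat_substring s (repeat_substring s)

-- ===== LEMMAS AND PROOFS =====

-- index-congruence for getElem
lemma pvGet_congr (cs : List Char) {i j : Nat} (hij : i = j) (hi : i < cs.length) :
    cs[i] = cs[j]'(hij ▸ hi) := by subst hij; rfl

-- `pvR cs q`: rotating cs by q (cyclically) leaves it unchanged
def pvR (cs : List Char) (q : Nat) : Prop :=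
  ∀ i, (h : i < cs.length) → cs[(i + q) % cs.length]'(Nat.mod_lt _ (by omega)) = cs[i]

lemma pvR_n (cs : List Char) : pvR cs cs.length := by
  intro i hi
  exact pvGet_congr cs (by rw [Nat.add_mod_right]; exact Nat.mod_eq_of_lt hi) _

lemma pvR_add (cs : List Char) (a b : Nat) (ha : pvR cs a) (hb : pvR cs b) :
    pvR cs (a + b) := by
  intro i hi
  have hj : (i + a) % cs.length < cs.length := Nat.mod_lt _ (by omega)
  have h1 := hb ((i + a) % cs.length) hj
  have h2 := ha i hi
  calc cs[(i + (a + b)) % cs.length]'(Nat.mod_lt _ (by omega))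
      = cs[((i + a) % cs.length + b) % cs.length]'(Nat.mod_lt _ (by omega)) := by
        exact pvGet_congr cs (by rw [Nat.mod_add_mod, Nat.add_assoc]) _
    _ = cs[(i + a) % cs.length]'hj := h1
    _ = cs[i] := h2

lemma pvR_mod (cs : List Char) (q : Nat) (hq : pvR cs q) : pvR cs (q % cs.length) := by
  intro i hi
  have := hq i hi
  calc cs[(i + q % cs.length) % cs.length]'(Nat.mod_lt _ (by omega))
      = cs[(i + q) % cs.length]'(Nat.mod_lt _ (by omega)) := by
        exact pvGet_congr cs (by rw [Nat.add_mod, Nat.mod_mod_of_dvd q (dvd_refl _), ← Nat.add_mod]) _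
    _ = cs[i] := this

lemma pvR_sub (cs : List Char) (p : Nat) (hp : pvR cs p) (hpn : p ≤ cs.length) :
    pvR cs (cs.length - p) := by
  intro i hi
  have hj : (i + (cs.length - p)) % cs.length < cs.length := Nat.mod_lt _ (by omega)
  have h1 := hp ((i + (cs.length - p)) % cs.length) hj
  have hidx : ((i + (cs.length - p)) % cs.length + p) % cs.length = i := by
    rw [Nat.mod_add_mod]
    have : i + (cs.length - p) + p = i + cs.length := by omega
    rw [this, Nat.add_mod_right]
    exact Nat.mod_eq_of_lt hi
  calc cs[(i + (cs.length - p)) % cs.length]'hj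
      = cs[((i + (cs.length - p)) % cs.length + p) % cs.length]'(Nat.mod_lt _ (by omega)) := h1.symm
    _ = cs[i] := pvGet_congr cs hidx _

lemma pvR_mul (cs : List Char) (p : Nat) (hp : pvR cs p) (k : Nat) : pvR cs (k * p) := by
  induction k with
  | zero =>
    intro i hi
    exact pvGet_congr cs (by simpa using Nat.mod_eq_of_lt hi) _
  | succ k ih =>
    have := pvR_add cs (k * p) p ih hp
    simpa [Nat.succ_mul] using this

lemma pvR_min_dvd (cs : List Char) (P : Nat) (_h0 : 0 < cs.length)
    (hP : pvR cs P) (hP1 : 1 ≤ P) (hPn : P ≤ cs.length)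
    (hmin : ∀ q, 1 ≤ q → q < P → ¬ pvR cs q) (m : Nat) (hm : pvR cs m) : P ∣ m := by
  have hsub : pvR cs (cs.length - P) := pvR_sub cs P hP hPn
  have hk : ∀ k, pvR cs (m + k * (cs.length - P)) := by
    intro k
    induction k with
    | zero => simpa using hm
    | succ k ih =>
      have := pvR_add cs (m + k * (cs.length - P)) (cs.length - P) ih hsub
      have harith : m + k * (cs.length - P) + (cs.length - P) = m + (k + 1) * (cs.length - P) := by ring
      rwa [harith] at this
  have hdm := Nat.div_add_mod m P
  have harith : m + (m / P) * (cs.length - P) = m % P + (m / P) * cs.length := by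
    have h2 : (m / P) * P ≤ (m / P) * cs.length := Nat.mul_le_mul_left _ hPn
    have h3 : (m / P) * (cs.length - P) = (m / P) * cs.length - (m / P) * P := Nat.mul_sub _ _ _
    have h5 : P * (m / P) = (m / P) * P := Nat.mul_comm _ _
    omega
  have h2 : pvR cs (m % P + (m / P) * cs.length) := harith ▸ hk (m / P)
  have h3 : pvR cs (m % P) := by
    have := pvR_mod cs _ h2
    rwa [Nat.add_mul_mod_self_right, Nat.mod_eq_of_lt (by have := Nat.mod_lt m (show 0 < P by omega); omega)] at this
  rcases Nat.eq_zero_or_pos (m % P) with hz | hpos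
  · exact Nat.dvd_of_mod_eq_zero hz
  · exact absurd h3 (hmin (m % P) hpos (Nat.mod_lt m (by omega)))

lemma pvR_per (cs : List Char) (q : Nat) (hq : pvR cs q) :
    ∀ i, (h : i + q < cs.length) → cs[i + q] = cs[i]'(by omega) := by
  intro i h
  have := hq i (by omega)
  calc cs[i + q] = cs[(i + q) % cs.length]'(Nat.mod_lt _ (by omega)) :=
        pvGet_congr cs (Nat.mod_eq_of_lt h).symm _
    _ = cs[i] := this

lemma pvPer_pt (cs : List Char) (m : Nat) (hm1 : 1 ≤ m)
    (hper : ∀ i, (h : i + m < cs.length) → cs[i + m] = cs[i]'(by omega)) :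
    ∀ i, (h : i < cs.length) → cs[i] = cs[i % m]'(by
      have := Nat.mod_le i m; omega) := by
  intro i
  induction i using Nat.strong_induction_on with
  | _ i ih =>
    intro h
    by_cases hlt : i < m
    · exact pvGet_congr cs (Nat.mod_eq_of_lt hlt).symm _
    · have hi' : i - m < i := by omega
      have hper' : cs[i - m + m] = cs[i - m]'(by omega) := hper (i - m) (by omega)
      have hstep : cs[i] = cs[i - m]'(by omega) := by
        have : i - m + m = i := by omega
        calc cs[i] = cs[i - m + m]'(by omega) := pvGet_congr cs this.symm _
          _ = cs[i - m]'(by omega) := hper (i - m) (by omega)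
      rw [hstep, ih (i - m) hi' (by omega)]
      exact pvGet_congr cs (Nat.mod_eq_sub_mod (by omega)).symm _

lemma pvPt_r (cs : List Char) (m : Nat) (h0 : 0 < cs.length) (hdvd : m ∣ cs.length) (_hm1 : 1 ≤ m)
    (hpt : ∀ i, (h : i < cs.length) → cs[i] = cs[i % m]'(by have := Nat.mod_le i m; omega)) :
    pvR cs m := by
  intro i hi
  have hj : (i + m) % cs.length < cs.length := Nat.mod_lt _ (by omega)
  have e1 : (i + m) % cs.length % m = i % m := by
    rw [Nat.mod_mod_of_dvd _ hdvd, Nat.add_mod_right]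
  calc cs[(i + m) % cs.length]'hj
      = cs[(i + m) % cs.length % m]'(by have := Nat.mod_le ((i + m) % cs.length) m; omega) :=
        hpt _ hj
    _ = cs[i % m]'(by have := Nat.mod_le i m; omega) := pvGet_congr cs e1 _
    _ = cs[i] := (hpt i hi).symm

lemma pvFlatten_len (xs : List Char) (k : Nat) :
    (List.flatten (List.replicate k xs)).length = k * xs.length := by
  induction k with
  | zero => simp
  | succ k ih => simp [List.replicate_succ, ih, Nat.succ_mul]; ring

lemma pvFlatten_get (xs : List Char) (k i : Nat) (hx : 0 < xs.length) (h : i < k * xs.length) :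
    (List.flatten (List.replicate k xs))[i]'(by rw [pvFlatten_len]; exact h) =
      xs[i % xs.length]'(Nat.mod_lt _ hx) := by
  induction k generalizing i with
  | zero => omega
  | succ k ih =>
    simp only [List.replicate_succ, List.flatten_cons]
    by_cases hlt : i < xs.length
    · rw [List.getElem_append_left hlt]
      exact pvGet_congr xs (Nat.mod_eq_of_lt hlt).symm _
    · rw [List.getElem_append_right (by omega)]
      have h' : i - xs.length < k * xs.length := by
        have h1 : (k + 1) * xs.length = k * xs.length + xs.length := by ring
        omega
      calc (List.flatten (List.replicate k xs))[i - xs.length]'(by rw [pvFlatten_len]; exact h')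
          = xs[(i - xs.length) % xs.length]'(Nat.mod_lt _ hx) := ih (i - xs.length) h'
        _ = xs[i % xs.length]'(Nat.mod_lt _ hx) :=
            pvGet_congr xs (Nat.mod_eq_sub_mod (by omega)).symm _

-- previous-style A lemmas
lemma pvCondA_iff (cs : List Char) (n m : Nat) :
    pvCondA cs n m = true ↔ PySem.List.pyRepeat (cs.take m) ((n / m : Nat) : Int) = cs := by
  simp [pvCondA]

lemma pvLen_pyRepeat (xs : List Char) (m : Nat) :
    (PySem.List.pyRepeat xs ((m : Nat) : Int)).length = m * xs.length := by
  simp [PySem.List.pyRepeat]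

lemma pvCondA_dvd (cs : List Char) (n m : Nat) (hn : n = cs.length) (_h1 : 1 ≤ m)
    (h2 : m ≤ n) (h : pvCondA cs n m = true) : m ∣ n := by
  rw [pvCondA_iff] at h
  have hlen := congrArg List.length h
  rw [pvLen_pyRepeat, List.length_take] at hlen
  have hmin : min m cs.length = m := by omega
  rw [hmin, ← hn] at hlen
  exact Dvd.intro_left (n / m) hlen

-- the tiling test of A is exactly "m divides n and rotation by m fixes cs"
lemma pvCondA_iff_R (cs : List Char) (n m : Nat) (hn : n = cs.length) (h0 : 0 < n)
    (hm1 : 1 ≤ m) (hm2 : m ≤ n) :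
    pvCondA cs n m = true ↔ (m ∣ n ∧ pvR cs m) := by
  subst hn
  have htlen : (cs.take m).length = m := by simp; omega
  have hre : PySem.List.pyRepeat (cs.take m) ((cs.length / m : Nat) : Int) =
      List.flatten (List.replicate (cs.length / m) (cs.take m)) := by
    simp only [PySem.List.pyRepeat, Int.toNat_natCast]
  constructor
  · intro h
    have hdvd : m ∣ cs.length := pvCondA_dvd cs cs.length m rfl hm1 hm2 h
    refine ⟨hdvd, ?_⟩
    rw [pvCondA_iff, hre] at h
    apply pvPt_r cs m h0 hdvd hm1
    intro i hi
    have hi' : i < (cs.length / m) * (cs.take m).length := by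
      rw [htlen, Nat.div_mul_cancel hdvd]; exact hi
    have hflat := pvFlatten_get (cs.take m) (cs.length / m) i (by omega) hi'
    have hidx : i % (cs.take m).length = i % m := by rw [htlen]
    calc cs[i]
        = (List.flatten (List.replicate (cs.length / m) (cs.take m)))[i]'(by
            rw [pvFlatten_len]; exact hi') := (List.getElem_of_eq h _).symm
      _ = (cs.take m)[i % (cs.take m).length]'(Nat.mod_lt _ (by omega)) := hflat
      _ = (cs.take m)[i % m]'(by rw [htlen]; exact Nat.mod_lt _ (by omega)) :=
          pvGet_congr (cs.take m) hidx _
      _ = cs[i % m]'(by have := Nat.mod_le i m; omega) := List.getElem_take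
  · rintro ⟨hdvd, hR⟩
    rw [pvCondA_iff, hre]
    have hpt := pvPer_pt cs m hm1 (pvR_per cs m hR)
    apply List.ext_getElem
    · rw [pvFlatten_len, htlen, Nat.div_mul_cancel hdvd]
    · intro i h1 h2
      have hi' : i < (cs.length / m) * (cs.take m).length := by
        rw [pvFlatten_len] at h1; exact h1
      have hidx : i % (cs.take m).length = i % m := by rw [htlen]
      calc (List.flatten (List.replicate (cs.length / m) (cs.take m)))[i]
          = (cs.take m)[i % (cs.take m).length]'(Nat.mod_lt _ (by omega)) :=
            pvFlatten_get (cs.take m) (cs.length / m) i (by omega) hi'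
        _ = (cs.take m)[i % m]'(by rw [htlen]; exact Nat.mod_lt _ (by omega)) :=
            pvGet_congr (cs.take m) hidx _
        _ = cs[i % m]'(by have := Nat.mod_le i m; omega) := List.getElem_take
        _ = cs[i] := (hpt i h2).symm

-- occurrence of cs at shift q in cs++cs is exactly pvR q
lemma pvOcc_iff (cs : List Char) (q : Nat) (h0 : 0 < cs.length) (hq1 : 1 ≤ q)
    (hqn : q ≤ cs.length) :
    cs <+: (cs ++ cs).drop q ↔ pvR cs q := by
  have happlen : (cs ++ cs).length = 2 * cs.length := by simp; omega
  have happget : ∀ j, (h : j < (cs ++ cs).length) →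
      (cs ++ cs)[j] = cs[j % cs.length]'(Nat.mod_lt _ h0) := by
    intro j h
    by_cases hlt : j < cs.length
    · rw [List.getElem_append_left hlt]
      exact pvGet_congr cs (Nat.mod_eq_of_lt hlt).symm _
    · rw [List.getElem_append_right (le_of_not_gt hlt)]
      have hj2 : j < 2 * cs.length := by rw [happlen] at h; exact h
      have he : j - cs.length = j % cs.length := by
        rw [Nat.mod_eq_sub_mod (le_of_not_gt hlt), Nat.mod_eq_of_lt (by omega)]
      exact pvGet_congr cs he _
  constructor
  · intro hpre i hi
    have hi2 : i < ((cs ++ cs).drop q).length := by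
      rw [List.length_drop, happlen]; omega
    have h1 : cs[i] = ((cs ++ cs).drop q)[i] := hpre.getElem hi
    rw [List.getElem_drop, happget (q + i) (by rw [happlen]; omega)] at h1
    calc cs[(i + q) % cs.length]'(Nat.mod_lt _ (by omega))
        = cs[(q + i) % cs.length]'(Nat.mod_lt _ (by omega)) :=
          pvGet_congr cs (by rw [Nat.add_comm]) _
      _ = cs[i] := h1.symm
  · intro hR
    rw [List.prefix_iff_eq_take]
    apply List.ext_getElem
    · rw [List.length_take, List.length_drop, happlen]; omega
    · intro i h1 h2
      have h3 : i < ((cs ++ cs).drop q).length := by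
        rw [List.length_drop, happlen]; omega
      calc cs[i]
          = cs[(i + q) % cs.length]'(Nat.mod_lt _ (by omega)) := (hR i h1).symm
        _ = cs[(q + i) % cs.length]'(Nat.mod_lt _ (by omega)) :=
            pvGet_congr cs (by rw [Nat.add_comm]) _
        _ = (cs ++ cs)[q + i]'(by rw [happlen]; omega) :=
            (happget (q + i) (by rw [happlen]; omega)).symm
        _ = ((cs ++ cs).drop q)[i]'h3 := List.getElem_drop.symm
        _ = (List.take cs.length ((cs ++ cs).drop q))[i] := List.getElem_take.symm

lemma pvLoopA_none (cs : List Char) (n : Nat) :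
    ∀ L, (∀ m, 1 ≤ m → m ≤ L → ¬ pvCondA cs n m = true) → pvLoopA cs n L = [] := by
  intro L
  induction L with
  | zero => intro _; rfl
  | succ L ih =>
    intro h
    rw [pvLoopA, if_neg (h (L + 1) (by omega) (by omega)), ih]
    intro m h1 h2; exact h m h1 (by omega)

lemma pvLoopA_found (cs : List Char) (n : Nat) (M : Nat) (hM : pvCondA cs n M = true) :
    ∀ L, 1 ≤ M → M ≤ L → (∀ m, M < m → m ≤ L → ¬ pvCondA cs n m = true) →
      pvLoopA cs n L = cs.take M := by
  intro L
  induction L with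
  | zero => intro h1 h2 _; omega
  | succ L ih =>
    intro h1 h2 hgt
    by_cases hc : M = L + 1
    · subst hc; rw [pvLoopA, if_pos hM]
    · rw [pvLoopA, if_neg (hgt (L + 1) (by omega) (by omega))]
      exact ih h1 (by omega) (fun m hm1 hm2 => hgt m hm1 (by omega))

lemma pvLoopD_eval (rN D : Nat) (hdvd : D ∣ rN) :
    ∀ fuel d, 2 ≤ d → d ≤ D → D < d + fuel → (∀ j, d ≤ j → j < D → ¬ (j ∣ rN)) →
      pvLoopD (rN : Int) (d : Int) fuel = (D : Int) := by
  intro fuel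
  induction fuel with
  | zero => intro d _ _ _ _; omega
  | succ fuel ih =>
    intro d h2 hdD hlt hnone
    by_cases hc : d = D
    · subst hc
      rw [pvLoopD, if_pos (by rw [PySem.Int.mod_eq_zero_iff_dvd]; exact_mod_cast hdvd)]
    · have hnd : ¬ ((d : Int) ∣ (rN : Int)) := by
        intro hdd
        exact hnone d le_rfl (by omega) (by exact_mod_cast hdd)
      rw [pvLoopD, if_neg (by rw [PySem.Int.mod_eq_zero_iff_dvd]; exact hnd)]
      have : ((d : Int) + 1) = ((d + 1 : Nat) : Int) := by push_cast; ring
      rw [this]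
      exact ih (d + 1) (by omega) (by omega) (by omega)
        (fun j hj1 hj2 => hnone j (by omega) hj2)

-- the B-side pipeline evaluated: smallest positive q with pvR, then the divisor arithmetic
lemma pvMain (cs : List Char) (h0 : 0 < cs.length) :
    pvLoopA cs cs.length (cs.length / 2) =
      (if PySem.Chars.findFrom (cs ++ cs) cs 1 = (cs.length : Int) then []
       else
         let r : Int := PySem.Int.floordiv (cs.length : Int) (PySem.Chars.findFrom (cs ++ cs) cs 1)
         let d : Int := pvLoopD r 2 r.toNat
         PySem.List.slice cs none (some (PySem.Int.floordiv (cs.length : Int) d))) := by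
  have hone : ((1 : Nat) : Int) = (1 : Int) := Nat.cast_one
  have happlen : (cs ++ cs).length = 2 * cs.length := by simp; omega
  have hdropn : (cs ++ cs).drop cs.length = cs := List.drop_left
  -- the doubled string contains cs at shift cs.length, hence somewhere in [1, cs.length]
  have hinf : cs <:+: (cs ++ cs).drop 1 := by
    rw [List.infix_iff_prefix_suffix]
    refine ⟨(cs ++ cs).drop cs.length, by rw [hdropn], ?_⟩
    have he : (cs ++ cs).drop cs.length = ((cs ++ cs).drop 1).drop (cs.length - 1) := by
      rw [List.drop_drop]; congr 1; omega
    rw [he]; exact List.drop_suffix _ _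
  have hne : PySem.Chars.findFrom (cs ++ cs) cs ((1 : Nat) : Int) ≠ -1 := by
    rw [Ne, PySem.Chars.findFrom_natCast_eq_neg_one_iff _ _ 1 (by omega)]
    exact not_not_intro hinf
  obtain ⟨hge, hpre, hmin⟩ :=
    PySem.Chars.findFrom_natCast_spec (cs ++ cs) cs 1 (by omega) hne
  set P : Int := PySem.Chars.findFrom (cs ++ cs) cs ((1 : Nat) : Int) with hPdef
  set pN : Nat := P.toNat with hpNdef
  have hP1 : (1 : Int) ≤ P := by exact_mod_cast hge
  have hPeq : P = (pN : Int) := (Int.toNat_of_nonneg (by omega)).symm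
  have hp1 : 1 ≤ pN := by omega
  have hpn : pN ≤ cs.length := by
    by_contra hgt
    exact hmin cs.length (by omega) (by omega) (by rw [hdropn])
  have h0 : 0 < cs.length := h0
  have hRp : pvR cs pN := (pvOcc_iff cs pN h0 hp1 hpn).mp hpre
  have hminR : ∀ q, 1 ≤ q → q < pN → ¬ pvR cs q := fun q h1 h2 hr =>
    hmin q h1 h2 ((pvOcc_iff cs q h0 h1 (by omega)).mpr hr)
  have hdvd_all : ∀ m, pvR cs m → pN ∣ m := pvR_min_dvd cs pN h0 hRp hp1 hpn hminR
  have hpn_dvd : pN ∣ cs.length := hdvd_all cs.length (pvR_n cs)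
  have hPval : PySem.Chars.findFrom (cs ++ cs) cs 1 = (pN : Int) := by
    rw [← hone, ← hPdef]; exact hPeq
  rw [hPval]
  by_cases hpeqn : pN = cs.length
  · rw [if_pos (by exact_mod_cast congrArg (Nat.cast : Nat → Int) hpeqn)]
    apply pvLoopA_none
    intro m h1 h2 hc
    obtain ⟨hdm, hRm⟩ := (pvCondA_iff_R cs cs.length m rfl h0 h1 (by omega)).mp hc
    have hle := Nat.le_of_dvd (by omega) (hdvd_all m hRm)
    omega
  · rw [if_neg (by intro he; exact hpeqn (by exact_mod_cast he))]
    simp only []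
    have hplt : pN < cs.length := by omega
    rw [PySem.Int.floordiv_natCast cs.length pN]
    set rN : Nat := cs.length / pN with hrNdef
    have hnpr : pN * rN = cs.length := Nat.mul_div_cancel' hpn_dvd
    have hr2 : 2 ≤ rN := by
      rcases rN with _ | _ | rN
      · omega
      · omega
      · omega
    -- smallest factor of rN
    have Dex : ∃ j, (2 + j) ∣ rN := ⟨rN - 2, by rw [show 2 + (rN - 2) = rN by omega]⟩
    set D : Nat := 2 + Nat.find Dex with hDdef
    have hDdvd : D ∣ rN := Nat.find_spec Dex
    have hDmin : ∀ e, 2 ≤ e → e ∣ rN → D ≤ e := by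
      intro e he hed
      have := Nat.find_min' Dex (m := e - 2) (by rw [show 2 + (e - 2) = e by omega]; exact hed)
      omega
    have hDle : D ≤ rN := hDmin rN hr2 dvd_rfl
    have hD2 : 2 ≤ D := by omega
    have hLoopD : pvLoopD (rN : Int) 2 ((rN : Int)).toNat = (D : Int) := by
      rw [Int.toNat_natCast, show (2 : Int) = ((2 : Nat) : Int) by norm_num]
      exact pvLoopD_eval rN D hDdvd rN 2 le_rfl hD2 (by omega)
        (fun j hj1 hj2 hjd => absurd (hDmin j hj1 hjd) (by omega))
    rw [hLoopD, PySem.Int.floordiv_natCast cs.length D, PySem.List.slice_to_natCast]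
    -- facts about n / D
    have hrdvd : rN ∣ cs.length := ⟨pN, by rw [Nat.mul_comm]; exact hnpr.symm⟩
    have hDn : D ∣ cs.length := hDdvd.trans hrdvd
    have hrn_le : rN ≤ cs.length := Nat.le_of_dvd h0 hrdvd
    have hnd1 : 1 ≤ cs.length / D := (Nat.one_le_div_iff (by omega)).mpr (by omega)
    have hnd_half : cs.length / D ≤ cs.length / 2 := Nat.div_le_div_left hD2 (by omega)
    have hndR : pvR cs (cs.length / D) := by
      have he : cs.length / D = (rN / D) * pN := by
        rw [← hnpr, Nat.mul_div_assoc pN hDdvd, Nat.mul_comm]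
      rw [he]
      exact pvR_mul cs pN hRp (rN / D)
    have hcond_nd : pvCondA cs cs.length (cs.length / D) = true :=
      (pvCondA_iff_R cs cs.length (cs.length / D) rfl h0 hnd1 (by
        have := Nat.div_le_self cs.length D; omega)).mpr
        ⟨Nat.div_dvd_of_dvd hDn, hndR⟩
    -- the greatest tiling length A finds
    have hMc : pvCondA cs cs.length (Nat.findGreatest (fun m => pvCondA cs cs.length m = true) (cs.length / 2)) = true :=
      Nat.findGreatest_spec (P := fun m => pvCondA cs cs.length m = true) hnd_half hcond_nd
    have hMge : cs.length / D ≤ Nat.findGreatest (fun m => pvCondA cs cs.length m = true) (cs.length / 2) :=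
      Nat.le_findGreatest (P := fun m => pvCondA cs cs.length m = true) hnd_half hcond_nd
    set M : Nat := Nat.findGreatest (fun m => pvCondA cs cs.length m = true) (cs.length / 2) with hMdef
    have hMle : M ≤ cs.length / 2 := Nat.findGreatest_le _
    have hM1 : 1 ≤ M := le_trans hnd1 hMge
    -- M is a multiple of pN dividing cs.length, of size ≤ n/2, hence ≤ n/D
    obtain ⟨hMdvd, hMR⟩ :=
      (pvCondA_iff_R cs cs.length M rfl h0 hM1 (by omega)).mp hMc
    have hpM : pN ∣ M := hdvd_all M hMR
    obtain ⟨jq, hjM'⟩ := hpM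
    have hjM : pN * jq = M := hjM'.symm
    have hj1 : 1 ≤ jq := by
      rcases Nat.eq_zero_or_pos (jq) with hz | hpos
      · rw [hz, Nat.mul_zero] at hjM; omega
      · exact hpos
    have hjr : jq ∣ rN := by
      have h1 : pN * (jq) ∣ pN * rN := by rw [hjM, hnpr]; exact hMdvd
      exact (mul_dvd_mul_iff_left (by omega : pN ≠ 0)).mp h1
    have h2M : 2 * M ≤ cs.length := by
      have := (Nat.le_div_iff_mul_le (by omega : 0 < 2)).mp hMle
      omega
    have h2j : 2 * (jq) ≤ rN := by
      have he : pN * (2 * (jq)) = 2 * M := by rw [← hjM]; ring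
      have h1 : pN * (2 * (jq)) ≤ pN * rN := by rw [he, hnpr]; exact h2M
      exact Nat.le_of_mul_le_mul_left h1 (by omega)
    have hrj2 : 2 ≤ rN / (jq) := (Nat.le_div_iff_mul_le (by omega)).mpr (by omega)
    have hrjd : rN / (jq) ∣ rN := Nat.div_dvd_of_dvd hjr
    have hDle_rj : D ≤ rN / (jq) := hDmin _ hrj2 hrjd
    have hprod : rN / (jq) * M = cs.length := by
      calc rN / (jq) * M = pN * (rN / (jq) * (jq)) := by rw [← hjM]; ring
        _ = pN * rN := by rw [Nat.div_mul_cancel hjr]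
        _ = cs.length := hnpr
    have hMnd : M = cs.length / (rN / (jq)) := by
      rw [← hprod, Nat.mul_div_cancel_left M (by omega : 0 < rN / (jq))]
    have hMle_nd : M ≤ cs.length / D := by
      rw [hMnd]
      exact Nat.div_le_div_left hDle_rj (by omega)
    have hMeq : M = cs.length / D := le_antisymm hMle_nd hMge
    rw [pvLoopA_found cs cs.length M hMc (cs.length / 2) hM1 hMle
      (fun m hm1 hm2 => Nat.findGreatest_is_greatest (P := fun m => pvCondA cs cs.length m = true) hm1 hm2), hMeq]

-- ===== VERDICT (by name: the statement is the Claim_ definition above) =====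
theorem repeat_substring_spec : Claim_equal_repeat_substring := by
  intro s _
  unfold Spec_repeat_substring repeat_substring repeat_substring_alt
  by_cases hnil : s.toList = []
  · rw [if_pos hnil, hnil]
    rfl
  · rw [if_neg hnil]
    have h0 : 0 < s.toList.length := List.length_pos_of_ne_nil hnil
    have := pvMain s.toList h0
    simp only [] at this ⊢
    rw [if_neg (by omega : ¬ s.toList.length = 0), this]
    by_cases hc : PySem.Chars.findFrom (s.toList ++ s.toList) s.toList 1 = (s.toList.length : Int)
    · rw [if_pos hc, if_pos hc]
    · rw [if_neg hc, if_neg hc]
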